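-- pv_equiv track=rewrite | github.com/SuperShyft-devs/dev-api | modules/metsights/sync_service.py | _pick_metsights_payload_for_bases
-- ===== SOURCE A (Python) =====
-- from typing import Any
--
-- def _pick_metsights_payload_for_bases(merged: dict[str, Any], bases: frozenset[str]) -> dict[str, Any]:
--     out: dict[str, Any] = {}
--     for base in bases:
--         if base in merged:
--             out[base] = merged[base]
--         uk = f"{base}_unit"
--         if uk in merged:
--             out[uk] = merged[uk]
--     return out
-- ===== SOURCE B (Python) =====
-- def _pick_metsights_payload_for_bases(merged, bases):
--     # Inverted traversal: index candidate keys by first-occurrence rank, then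
--     # scan merged once, keep the indexed keys and order them by that rank.
--     rank = {}
--     i = 0
--     for b in bases:
--         for k in (b, b + "_unit"):
--             if k not in rank:
--                 rank[k] = i
--             i += 1
--     selected = [(k, v) for k, v in merged.items() if k in rank]
--     selected.sort(key=lambda kv: rank[kv[0]])
--     return dict(selected)
-- ===== Notes on version B (the rewrite author's own statement) =====
-- stated objective: alternative
-- what changed: A loops over bases and conditionally inserts each base and its _unit key into the output dict; B inverts the traversal: it builds a first-occurrence rank index of the candidate keys, scans merged once keeping the indexed items, sorts the survivors by rank and returns dict() of them.
import Mathlib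
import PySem

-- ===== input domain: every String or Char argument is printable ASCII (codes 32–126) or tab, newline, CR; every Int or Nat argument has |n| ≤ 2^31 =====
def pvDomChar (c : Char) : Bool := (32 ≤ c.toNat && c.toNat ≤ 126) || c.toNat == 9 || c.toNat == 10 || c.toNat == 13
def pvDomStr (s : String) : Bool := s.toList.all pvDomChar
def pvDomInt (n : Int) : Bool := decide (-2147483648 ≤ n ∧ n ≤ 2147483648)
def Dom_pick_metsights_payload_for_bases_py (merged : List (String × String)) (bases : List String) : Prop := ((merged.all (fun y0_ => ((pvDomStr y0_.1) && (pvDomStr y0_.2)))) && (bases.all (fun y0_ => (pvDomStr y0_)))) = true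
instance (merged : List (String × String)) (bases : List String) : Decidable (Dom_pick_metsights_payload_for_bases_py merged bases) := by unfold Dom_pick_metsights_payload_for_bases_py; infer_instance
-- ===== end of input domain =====

-- B inverts the traversal: it indexes the candidate keys by first-occurrence rank, scans merged once
-- keeping the indexed keys, and sorts the survivors by rank; objective: alternative algorithm, no speed claim.

-- ===== PORT A =====
-- A: for each base, conditionally insert base and base+"_unit" into an output dict.
def pick_metsights_payload_for_bases_py (merged : List (String × String)) (bases : List String) : List (String × String) :=
  let m : PySem.Dict String String := PySem.Dict.mk merged
  (bases.foldl (fun out base =>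
      let out1 := if m.contains base then out.insert base (m.getD base "") else out
      let uk := base ++ "_unit"
      if m.contains uk then out1.insert uk (m.getD uk "") else out1)
    PySem.Dict.empty).items

-- ===== PORT B =====
-- B: rank = first-occurrence index of each candidate key; selected = items of merged whose key is
-- indexed; sort selected by rank; dict(selected).  (rank[kv[0]] in the sort key is total here —
-- every selected key is in rank — so it is ported as getD with an unused default.)
def pick_metsights_payload_for_bases_py_alt (merged : List (String × String)) (bases : List String) : List (String × String) :=
  let rank : PySem.Dict String Int := (bases.foldl (fun (p : PySem.Dict String Int × Int) b =>
      [b, b ++ "_unit"].foldl (fun (q : PySem.Dict String Int × Int) k =>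
        (if q.1.contains k then q.1 else q.1.insert k q.2, q.2 + 1)) p)
    (PySem.Dict.empty, 0)).1
  let selected := merged.filter (fun kv => rank.contains kv.1)
  let sortedSel := PySem.List.sorted selected (fun kv => rank.getD kv.1 0)
  (PySem.Dict.ofList sortedSel).items

-- ===== PRECONDITION & SPEC =====
-- Pre_ requires merged's keys to be distinct: merged stands for a Python dict, whose keys are
-- necessarily distinct, so a duplicate-key list corresponds to no Python input.
def Pre_pick_metsights_payload_for_bases_py (merged : List (String × String)) (bases : List String) : Prop :=
  (merged.map Prod.fst).Nodup
instance (merged : List (String × String)) (bases : List String) : Decidable (Pre_pick_metsights_payload_for_bases_py merged bases) := by unfold Pre_pick_metsights_payload_for_bases_py; infer_instance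
def pvWitness_pick_metsights_payload_for_bases_py : (List (String × String)) × List String :=
  ([("t", "1"), ("t_unit", "C"), ("hum", "55")], ["t", "p"])
def Spec_pick_metsights_payload_for_bases_py (merged : List (String × String)) (bases : List String) (out : List (String × String)) : Prop := out = pick_metsights_payload_for_bases_py_alt merged bases
instance (merged : List (String × String)) (bases : List String) (out : List (String × String)) : Decidable (Spec_pick_metsights_payload_for_bases_py merged bases out) := by unfold Spec_pick_metsights_payload_for_bases_py; infer_instance

-- ===== CLAIM (what is proved, stated in full; the proofs are below) =====
def Claim_equal_pick_metsights_payload_for_bases_py : Prop := ∀ (merged : List (String × String)) (bases : List String), Dom_pick_metsights_payload_for_bases_py merged bases → Pre_pick_metsights_payload_for_bases_py merged bases → Spec_pick_metsights_payload_for_bases_py merged bases (pick_metsights_payload_for_bases_py merged bases)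

-- ===== LEMMAS AND PROOFS =====

-- the candidate-key sequence both programs work through
def pvCands (bases : List String) : List String := bases.flatMap (fun b => [b, b ++ "_unit"])

-- ---------- A side: A's dict-building loop lands at the filtered dedup of the candidates ----------

-- the dict built by inserting (k, val k) for the keys of S that satisfy p
def pvListD (p : String → Bool) (val : String → String) (S : List String) : PySem.Dict String String :=
  PySem.Dict.mk ((S.filter p).map (fun k => (k, val k)))

lemma pvContainsListD (p : String → Bool) (val : String → String) (S : List String) (k : String) :
    (pvListD p val S).contains k = decide (k ∈ S ∧ p k = true) := by
  rw [PySem.Dict.contains_eq_decide_mem_keys]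
  simp only [pvListD, PySem.Dict.keys, List.map_map]
  simp [List.mem_filter]

-- overwriting an entry of such a dict with its own value is the identity
lemma pvMapSelf (p : String → Bool) (val : String → String) (S : List String) (k : String) :
    ((S.filter p).map (fun k' => (k', val k'))).map
      (fun q => if q.1 == k then (k, val k) else q) = (S.filter p).map (fun k' => (k', val k')) := by
  rw [List.map_map]
  apply List.map_congr_left
  intro a _
  by_cases h : a = k
  · simp [h]
  · simp [Function.comp, h]

-- core invariant: the insert loop over a key list, started from pvListD S, lands at pvListD (S updated with the keys)
lemma pvFoldInvariant (p : String → Bool) (val : String → String) (keys : List String) :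
    ∀ S : List String,
      keys.foldl (fun out k => if p k then out.insert k (val k) else out) (pvListD p val S)
        = pvListD p val (keys.foldl PySem.Set.add S) := by
  induction keys with
  | nil => intro S; rfl
  | cons k rest ih =>
    intro S
    have hstep : (if p k then (pvListD p val S).insert k (val k) else pvListD p val S)
        = pvListD p val (PySem.Set.add S k) := by
      by_cases hp : p k = true
      · simp only [hp, if_true]
        by_cases hm : k ∈ S
        · rw [PySem.Set.add_of_mem hm]
          have hc : (pvListD p val S).contains k = true := by
            rw [pvContainsListD]; simp [hm, hp]
          apply PySem.Dict.ext
          rw [PySem.Dict.items_insert_of_contains _ _ hc]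
          simpa [pvListD] using pvMapSelf p val S k
        · rw [PySem.Set.add_of_not_mem hm]
          have hc : (pvListD p val S).contains k = false := by
            rw [pvContainsListD]; simp [hm]
          apply PySem.Dict.ext
          rw [PySem.Dict.items_insert_of_not_contains _ _ hc]
          simp [pvListD, List.filter_append, hp]
      · simp only [Bool.not_eq_true] at hp
        simp only [hp, Bool.false_eq_true, if_false]
        rw [PySem.Set.add_eq_ite]
        by_cases hm : k ∈ S
        · simp [hm]
        · simp only [hm, if_false]
          simp [pvListD, List.filter_append, hp]
    simp only [List.foldl_cons, hstep]
    exact ih (PySem.Set.add S k)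

-- A's whole loop, with the merged dict abstracted to m
lemma pvAMain (m : PySem.Dict String String) (bases : List String) :
    (bases.foldl (fun out base =>
        let out1 := if m.contains base then out.insert base (m.getD base "") else out
        let uk := base ++ "_unit"
        if m.contains uk then out1.insert uk (m.getD uk "") else out1)
      PySem.Dict.empty).items
      = ((PySem.List.dedup (pvCands bases)).filter
          (fun k => m.contains k)).map (fun k => (k, m.getD k "")) := by
  have hflat : bases.foldl (fun out base =>
        let out1 := if m.contains base then out.insert base (m.getD base "") else out
        let uk := base ++ "_unit"
        if m.contains uk then out1.insert uk (m.getD uk "") else out1)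
      PySem.Dict.empty
      = (pvCands bases).foldl
          (fun out k => if m.contains k then out.insert k (m.getD k "") else out) PySem.Dict.empty := by
    rw [pvCands, List.foldl_flatMap]
    rfl
  have hempty : (PySem.Dict.empty : PySem.Dict String String)
      = pvListD (fun k => m.contains k) (fun k => m.getD k "") [] := rfl
  rw [hflat, hempty, pvFoldInvariant]
  rw [PySem.List.dedup_eq_ofList, PySem.Set.ofList_eq_foldl]
  rfl

-- ---------- B side ----------

-- the rank loop characterised: the stored index is the first-occurrence index in the key list
lemma pvRankGet (l : List String) : ∀ (d : PySem.Dict String Int) (n : Int) (k : String),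
    ((l.foldl (fun (q : PySem.Dict String Int × Int) k =>
        (if q.1.contains k then q.1 else q.1.insert k q.2, q.2 + 1)) (d, n)).1).get? k
      = (d.get? k).or (if k ∈ l then some (n + (l.idxOf k : Int)) else none) := by
  induction l with
  | nil => intro d n k; simp
  | cons a t ih =>
    intro d n k
    simp only [List.foldl_cons]
    by_cases hc : d.contains a = true
    · simp only [hc, if_true]
      rw [ih d (n + 1) k]
      rcases hd : d.get? k with _ | v
      · have hka : k ≠ a := by
          intro h; subst h
          rw [PySem.Dict.contains_eq_isSome_get?, hd] at hc; simp at hc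
        simp only [Option.or]
        by_cases ht : k ∈ t
        · rw [if_pos ht, if_pos (by simp [ht]), List.idxOf_cons_ne _ (Ne.symm hka)]
          push_cast; ring_nf
        · rw [if_neg ht, if_neg (by simp [hka, ht])]
      · simp [Option.or]
    · rw [if_neg hc]
      rw [ih (d.insert a n) (n + 1) k, PySem.Dict.get?_insert]
      by_cases hka : k = a
      · subst hka
        have hd : d.get? k = none := by
          rw [PySem.Dict.contains_eq_isSome_get?] at hc
          cases h : d.get? k <;> simp [h] at hc ⊢
        simp [hd, Option.or, List.idxOf_cons_self]
      · simp only [if_neg hka]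
        rcases hd : d.get? k with _ | v
        · simp only [Option.or]
          by_cases ht : k ∈ t
          · rw [if_pos ht, if_pos (by simp [ht]), List.idxOf_cons_ne _ (Ne.symm hka)]
            push_cast; ring_nf
          · rw [if_neg ht, if_neg (by simp [hka, ht])]
        · simp [Option.or]

-- dedup lists first occurrences in order: its order is the order of first-occurrence indices
lemma pvDedupPairwise (l : List String) :
    (PySem.List.dedup l).Pairwise (fun a b => l.idxOf a < l.idxOf b) := by
  induction l using List.reverseRecOn with
  | nil => simp [PySem.List.dedup, PySem.Set.ofList, PySem.Set.empty]
  | append_singleton l x ih =>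
    have hstep : PySem.List.dedup (l ++ [x]) = PySem.Set.add (PySem.List.dedup l) x := by
      simp only [PySem.List.dedup_eq_ofList, PySem.Set.ofList_eq_foldl, List.foldl_append,
        List.foldl_cons, List.foldl_nil]
    have hidx : ∀ a ∈ PySem.List.dedup l, List.idxOf a (l ++ [x]) = List.idxOf a l := by
      intro a ha
      rw [List.idxOf_append, if_pos ((PySem.List.mem_dedup l a).mp ha)]
    by_cases hx : x ∈ PySem.List.dedup l
    · rw [hstep, PySem.Set.add_of_mem hx]
      exact List.Pairwise.imp_of_mem
        (fun {a b} ha hb h => by rw [hidx a ha, hidx b hb]; exact h) ih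
    · rw [hstep, PySem.Set.add_of_not_mem hx]
      rw [List.pairwise_append]
      refine ⟨List.Pairwise.imp_of_mem
        (fun {a b} ha hb h => by rw [hidx a ha, hidx b hb]; exact h) ih, by simp, ?_⟩
      intro a ha b hb
      have hb' : b = x := by simpa using hb
      rw [hb']
      have hxl : x ∉ l := fun h => hx ((PySem.List.mem_dedup l x).mpr h)
      have h1 : List.idxOf a (l ++ [x]) = List.idxOf a l := hidx a ha
      have h2 : List.idxOf x (l ++ [x]) = l.length := by
        rw [List.idxOf_append, if_neg hxl, List.idxOf_cons_self]; omega
      rw [h1, h2]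
      exact List.idxOf_lt_length_of_mem ((PySem.List.mem_dedup l a).mp ha)

-- B's whole pipeline lands at the same filtered dedup, given distinct merged keys
lemma pvBMain (merged : List (String × String)) (bases : List String)
    (hnd : (merged.map Prod.fst).Nodup) :
    pick_metsights_payload_for_bases_py_alt merged bases
      = ((PySem.List.dedup (pvCands bases)).filter
          (fun k => (PySem.Dict.mk merged).contains k)).map
          (fun k => (k, (PySem.Dict.mk merged).getD k "")) := by
  have hflat : (bases.foldl (fun (p : PySem.Dict String Int × Int) b =>
      [b, b ++ "_unit"].foldl (fun (q : PySem.Dict String Int × Int) k =>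
        (if q.1.contains k then q.1 else q.1.insert k q.2, q.2 + 1)) p)
    (PySem.Dict.empty, 0))
      = ((pvCands bases).foldl (fun (q : PySem.Dict String Int × Int) k =>
        (if q.1.contains k then q.1 else q.1.insert k q.2, q.2 + 1)) (PySem.Dict.empty, 0)) := by
    rw [pvCands, List.foldl_flatMap]
  set m : PySem.Dict String String := PySem.Dict.mk merged with hm
  set c : List String := pvCands bases with hcdef
  set rank : PySem.Dict String Int := ((pvCands bases).foldl (fun (q : PySem.Dict String Int × Int) k =>
        (if q.1.contains k then q.1 else q.1.insert k q.2, q.2 + 1)) (PySem.Dict.empty, 0)).1 with hrank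
  have hget : ∀ k, rank.get? k = if k ∈ c then some ((c.idxOf k : Int)) else none := by
    intro k
    rw [hrank, pvRankGet]
    simp [Option.or, hcdef]
  have hcont : ∀ k, rank.contains k = decide (k ∈ c) := by
    intro k
    rw [PySem.Dict.contains_eq_isSome_get?, hget]
    by_cases h : k ∈ c <;> simp [h]
  have hgetD : ∀ k, k ∈ c → rank.getD k 0 = (c.idxOf k : Int) := by
    intro k hk
    rw [PySem.Dict.getD_eq_get?_getD, hget, if_pos hk]
    rfl
  have hkeys : m.keys = merged.map Prod.fst := rfl
  have hknd : m.keys.Nodup := by rw [hkeys]; exact hnd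
  have hitems : merged = m.keys.map (fun k => (k, m.getD k "")) := by
    have := PySem.Dict.items_eq_map_keys m hknd ""
    simpa using this
  -- the target list
  set T : List (String × String) := ((PySem.List.dedup c).filter
      (fun k => m.contains k)).map (fun k => (k, m.getD k "")) with hT
  -- the selected list is a filter of a key map
  have hsel : merged.filter (fun kv => rank.contains kv.1)
      = (m.keys.filter (fun k => rank.contains k)).map (fun k => (k, m.getD k "")) := by
    conv_lhs => rw [hitems]
    rw [List.filter_map]
    rfl
  -- the two key lists are permutations of each other
  have hpermKeys : ((PySem.List.dedup c).filter (fun k => m.contains k)).Perm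
      (m.keys.filter (fun k => rank.contains k)) := by
    rw [List.perm_ext_iff_of_nodup
      (List.Nodup.filter _ (by rw [PySem.List.dedup_eq_ofList]; exact PySem.Set.nodup_ofList c))
      (List.Nodup.filter _ hknd)]
    intro a
    simp only [List.mem_filter, PySem.List.mem_dedup, hcont,
      PySem.Dict.contains_eq_decide_mem_keys, decide_eq_true_eq]
    tauto
  have hperm : T.Perm (merged.filter (fun kv => rank.contains kv.1)) := by
    rw [hsel, hT]
    exact List.Perm.map _ hpermKeys
  -- T is strictly increasing under the sort key
  have hpair : T.Pairwise (fun a b => rank.getD a.1 0 < rank.getD b.1 0) := by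
    rw [hT, List.pairwise_map]
    have h1 : ((PySem.List.dedup c).filter (fun k => m.contains k)).Pairwise
        (fun a b => c.idxOf a < c.idxOf b) :=
      List.Pairwise.filter _ (pvDedupPairwise c)
    refine List.Pairwise.imp_of_mem (fun {a b} ha hb h => ?_) h1
    have hac : a ∈ c := (PySem.List.mem_dedup c a).mp (List.mem_of_mem_filter ha)
    have hbc : b ∈ c := (PySem.List.mem_dedup c b).mp (List.mem_of_mem_filter hb)
    rw [hgetD a hac, hgetD b hbc]
    exact_mod_cast h
  have hsorted : PySem.List.sorted (merged.filter (fun kv => rank.contains kv.1))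
      (fun kv => rank.getD kv.1 0) = T :=
    PySem.List.sorted_eq_of_perm_of_pairwise_lt _ _ _ hperm hpair
  -- dict(T) has T as its items again, since T's keys are distinct
  have hTnd : (T.map Prod.fst).Nodup := by
    have hTk : T.map Prod.fst = (PySem.List.dedup c).filter (fun k => m.contains k) := by
      rw [hT, List.map_map]; exact List.map_id' _
    rw [hTk]
    exact List.Nodup.filter _ (by rw [PySem.List.dedup_eq_ofList]; exact PySem.Set.nodup_ofList c)
  have hback : (PySem.Dict.ofList T).items = T := by
    show (PySem.Dict.empty.update T).items = T
    rw [PySem.Dict.update]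
    have := PySem.Dict.items_foldl_insert_fresh T Prod.fst Prod.snd PySem.Dict.empty
      (fun a _ => PySem.Dict.contains_empty a.1) hTnd
    simpa using this
  show (PySem.Dict.ofList (PySem.List.sorted
      (merged.filter (fun kv => ((bases.foldl (fun (p : PySem.Dict String Int × Int) b =>
        [b, b ++ "_unit"].foldl (fun (q : PySem.Dict String Int × Int) k =>
          (if q.1.contains k then q.1 else q.1.insert k q.2, q.2 + 1)) p)
        (PySem.Dict.empty, 0)).1).contains kv.1))
      (fun kv => ((bases.foldl (fun (p : PySem.Dict String Int × Int) b =>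
        [b, b ++ "_unit"].foldl (fun (q : PySem.Dict String Int × Int) k =>
          (if q.1.contains k then q.1 else q.1.insert k q.2, q.2 + 1)) p)
        (PySem.Dict.empty, 0)).1).getD kv.1 0))).items = T
  rw [hflat, ← hrank, hsorted, hback]

-- ===== VERDICT (by name: the statement is the Claim_ definition above) =====
theorem pick_metsights_payload_for_bases_py_spec : Claim_equal_pick_metsights_payload_for_bases_py := by
  intro merged bases _ hpre
  show pick_metsights_payload_for_bases_py merged bases = pick_metsights_payload_for_bases_py_alt merged bases
  rw [pvBMain merged bases hpre]
  exact pvAMain (PySem.Dict.mk merged) bases
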